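-- pv_equiv track=rewrite | github.com/QHuuT/gonogo | tools/import_real_github_data.py | get_status_from_state_and_labels
-- ===== SOURCE A (Python) =====
-- from typing import Any, Dict, List, Optional
--
-- def get_status_from_state_and_labels(state: str, labels: List[Dict]) -> str:
--     """Determine status from GitHub state and labels."""
--     label_names = [label.get("name", "").lower() for label in labels]
--
--     if state == "closed":
--         if any("status/done" in label for label in label_names):
--             return "completed"
--         else:
--             return "completed"  # assume closed = completed
--     else:  # open
--         if any("status/in-progress" in label for label in label_names):
--             return "in_progress"
--         elif any("status/blocked" in label for label in label_names):
--             return "blocked"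
--         elif any("status/ready" in label for label in label_names):
--             return "planned"
--         else:
--             return "planned"  # default for open issues
-- ===== SOURCE B (Python) =====
-- def get_status_from_state_and_labels(state, labels):
--     """Determine status from GitHub state and labels."""
--     if state == "closed":
--         return "completed"
--     in_progress = False
--     blocked = False
--     for label in labels:
--         name = label.get("name", "").lower()
--         if "status/in-progress" in name:
--             in_progress = True
--         elif "status/blocked" in name:
--             blocked = True
--     if in_progress:
--         return "in_progress"
--     if blocked:
--         return "blocked"
--     return "planned"
-- ===== Notes on version B (the rewrite author's own statement) =====
-- stated objective: simpler
-- what changed: Replaces A's list comprehension plus up to four separate any() scans over the names with an early return for closed state and one flag-setting pass over the labels followed by a priority resolution; the redundant status/done and status/ready scans disappear.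
import Mathlib
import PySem

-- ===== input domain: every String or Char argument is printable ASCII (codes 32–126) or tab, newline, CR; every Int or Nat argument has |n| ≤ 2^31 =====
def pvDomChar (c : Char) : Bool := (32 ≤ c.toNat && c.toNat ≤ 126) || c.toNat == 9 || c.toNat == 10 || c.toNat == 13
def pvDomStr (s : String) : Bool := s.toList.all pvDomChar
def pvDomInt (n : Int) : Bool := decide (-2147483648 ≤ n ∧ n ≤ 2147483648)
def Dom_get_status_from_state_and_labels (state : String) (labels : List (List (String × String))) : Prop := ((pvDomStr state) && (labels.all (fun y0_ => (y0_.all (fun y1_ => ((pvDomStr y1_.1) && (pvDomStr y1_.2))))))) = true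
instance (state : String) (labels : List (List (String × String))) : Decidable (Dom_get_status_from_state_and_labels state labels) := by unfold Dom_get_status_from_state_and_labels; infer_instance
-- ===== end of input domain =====

-- B: early return for closed state and one flag-setting pass over the labels instead of a comprehension plus several any() scans.


-- ===== PORT A =====
-- label.get("name", ""): first-match lookup in the association list (dict keys are unique)
def get_status_from_state_and_labels (state : String) (labels : List (List (String × String))) : String :=
  let label_names := labels.map (fun label => PySem.Str.lower ((label.lookup "name").getD ""))
  if state == "closed" then
    if label_names.any (fun label => PySem.Str.isIn "status/done" label) then "completed"
    else "completed"
  else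
    if label_names.any (fun label => PySem.Str.isIn "status/in-progress" label) then "in_progress"
    else if label_names.any (fun label => PySem.Str.isIn "status/blocked" label) then "blocked"
    else if label_names.any (fun label => PySem.Str.isIn "status/ready" label) then "planned"
    else "planned"

-- ===== PORT B =====
-- '<sub> in label.get("name", "").lower()' for one label
def pvQ (sub : String) (label : List (String × String)) : Bool :=
  PySem.Str.isIn sub (PySem.Str.lower ((label.lookup "name").getD ""))

-- the flag-setting for-loop of Source B: returns the final (in_progress, blocked)
def pvAltFlags : List (List (String × String)) → Bool → Bool → Bool × Bool
  | [], in_progress, blocked => (in_progress, blocked)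
  | label :: rest, in_progress, blocked =>
    if pvQ "status/in-progress" label then pvAltFlags rest true blocked
    else if pvQ "status/blocked" label then pvAltFlags rest in_progress true
    else pvAltFlags rest in_progress blocked

def get_status_from_state_and_labels_alt (state : String) (labels : List (List (String × String))) : String :=
  if state == "closed" then "completed"
  else
    let flags := pvAltFlags labels false false
    if flags.1 then "in_progress"
    else if flags.2 then "blocked"
    else "planned"

-- ===== PRECONDITION & SPEC =====
def Spec_get_status_from_state_and_labels (state : String) (labels : List (List (String × String))) (out : String) : Prop := out = get_status_from_state_and_labels_alt state labels
instance (state : String) (labels : List (List (String × String))) (out : String) : Decidable (Spec_get_status_from_state_and_labels state labels out) := by unfold Spec_get_status_from_state_and_labels; infer_instance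

-- ===== CLAIM (what is proved, stated in full; the proofs are below) =====
def Claim_equal_get_status_from_state_and_labels : Prop := ∀ (state : String) (labels : List (List (String × String))), Dom_get_status_from_state_and_labels state labels → Spec_get_status_from_state_and_labels state labels (get_status_from_state_and_labels state labels)

-- ===== LEMMAS AND PROOFS =====
theorem pvAltFlags_spec (labels : List (List (String × String))) (ip bl : Bool) :
    pvAltFlags labels ip bl =
      (ip || labels.any (pvQ "status/in-progress"),
       bl || labels.any (fun l => !pvQ "status/in-progress" l && pvQ "status/blocked" l)) := by
  induction labels generalizing ip bl with
  | nil => simp [pvAltFlags]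
  | cons l rest ih =>
    simp only [pvAltFlags, List.any_cons]
    cases h1 : pvQ "status/in-progress" l with
    | true =>
      rw [if_pos rfl, ih]
      simp
    | false =>
      rw [if_neg (by simp)]
      cases h2 : pvQ "status/blocked" l with
      | true =>
        rw [if_pos rfl, ih]
        simp
      | false =>
        rw [if_neg (by simp), ih]
        simp

theorem pv_any_bl_of_no_ip (labels : List (List (String × String)))
    (h : labels.any (pvQ "status/in-progress") = false) :
    labels.any (fun l => !pvQ "status/in-progress" l && pvQ "status/blocked" l)
      = labels.any (pvQ "status/blocked") := by
  induction labels with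
  | nil => rfl
  | cons l rest ih =>
    simp only [List.any_cons, Bool.or_eq_false_iff] at h
    simp [List.any_cons, h.1, ih h.2]

theorem get_status_from_state_and_labels_eq (state : String) (labels : List (List (String × String))) :
    get_status_from_state_and_labels state labels = get_status_from_state_and_labels_alt state labels := by
  unfold get_status_from_state_and_labels get_status_from_state_and_labels_alt
  cases hs : (state == "closed") with
  | true => simp
  | false =>
    have e : ∀ sub : String,
        ((labels.map (fun label => PySem.Str.lower ((label.lookup "name").getD ""))).any
          (fun label => PySem.Str.isIn sub label)) = labels.any (pvQ sub) := by
      intro sub; rw [List.any_map]; rfl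
    simp only [Bool.false_eq_true, if_false, pvAltFlags_spec, Bool.false_or,
      e "status/in-progress", e "status/blocked", e "status/ready"]
    cases hip : labels.any (pvQ "status/in-progress") with
    | true => simp
    | false =>
      rw [pv_any_bl_of_no_ip labels hip]
      simp only [Bool.false_eq_true, if_false]
      cases hbl : labels.any (pvQ "status/blocked") with
      | true => simp
      | false => simp

-- ===== VERDICT (by name: the statement is the Claim_ definition above) =====
theorem get_status_from_state_and_labels_spec : Claim_equal_get_status_from_state_and_labels := by
  intro state labels _
  exact get_status_from_state_and_labels_eq state labels
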